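-- pv_equiv track=rewrite | github.com/amargapinho/Python-Grundlagen | AB Listen/2/09.py | mehrPositiveOderNegativeZahlen
-- ===== SOURCE A (Python) =====
-- def mehrPositiveOderNegativeZahlen(liste):
--
--     negativeZahlen = 0
--     positiveZahlen = 0
--
--     for zahl in liste:
--         if(zahl<0):
--             negativeZahlen = negativeZahlen + 1
--
--         else:
--             positiveZahlen = positiveZahlen + 1
--
--     if(positiveZahlen < negativeZahlen):
--         return "Die Liste hat mehr negative als positive Zahlen"
--
--     elif(positiveZahlen > negativeZahlen):
--         return "Die Liste hat mehr positive als negative Zahlen"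
--
--     else:
--         return "Die Liste hat gleich viele positive und negative Zahlen"
-- ===== SOURCE B (Python) =====
-- def mehrPositiveOderNegativeZahlen(liste):
--     s = sorted(liste)
--     lo = 0
--     hi = len(s)
--     # binary search for the first non-negative position: lo ends as the
--     # number of negatives, since negatives form a prefix of the sorted list
--     while lo < hi:
--         mid = (lo + hi) // 2
--         if s[mid] < 0:
--             lo = mid + 1
--         else:
--             hi = mid
--     neg = lo
--     pos = len(s) - neg
--     if neg > pos:
--         return "Die Liste hat mehr negative als positive Zahlen"
--     elif pos > neg:
--         return "Die Liste hat mehr positive als negative Zahlen"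
--     else:
--         return "Die Liste hat gleich viele positive und negative Zahlen"
-- ===== Notes on version B (the rewrite author's own statement) =====
-- stated objective: alternative
-- what changed: Instead of counting with per-element counters, B sorts the list and locates the negative/non-negative boundary by binary search; the boundary index is the negative count, compared against the rest of the length.
import Mathlib
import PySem

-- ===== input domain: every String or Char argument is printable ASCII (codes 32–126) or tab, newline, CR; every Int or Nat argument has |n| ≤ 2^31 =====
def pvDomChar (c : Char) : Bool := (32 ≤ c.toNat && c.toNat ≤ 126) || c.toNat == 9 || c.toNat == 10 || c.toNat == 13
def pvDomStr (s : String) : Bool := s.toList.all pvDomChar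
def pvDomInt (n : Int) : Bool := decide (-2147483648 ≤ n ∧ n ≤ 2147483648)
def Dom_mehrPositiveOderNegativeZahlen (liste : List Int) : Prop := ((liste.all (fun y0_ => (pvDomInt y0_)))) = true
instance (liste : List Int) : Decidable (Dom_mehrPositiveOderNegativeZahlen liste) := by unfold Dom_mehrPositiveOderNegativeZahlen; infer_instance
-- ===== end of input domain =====

-- B replaces the counting pass by sort + binary search for the negative/non-negative
-- boundary of the sorted list: an alternative algorithm, same return value.

-- ===== PORT A =====
-- two counters (negativeZahlen, positiveZahlen), then compare
def mehrPositiveOderNegativeZahlen (liste : List Int) : String :=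
  let counts := liste.foldl
    (fun (st : Int × Int) zahl =>
      if zahl < 0 then (st.1 + 1, st.2) else (st.1, st.2 + 1))
    (0, 0)
  if counts.2 < counts.1 then "Die Liste hat mehr negative als positive Zahlen"
  else if counts.2 > counts.1 then "Die Liste hat mehr positive als negative Zahlen"
  else "Die Liste hat gleich viele positive und negative Zahlen"

-- ===== PORT B =====
-- the while loop of Source B; s[mid] is always in range here, so pyGetD is exact
def pvBsearch (s : List Int) (lo hi : Int) : Int :=
  if h : lo < hi then
    let mid := PySem.Int.floordiv (lo + hi) 2
    if PySem.List.pyGetD s mid 0 < 0 then pvBsearch s (mid + 1) hi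
    else pvBsearch s lo mid
  else lo
termination_by (hi - lo).toNat
decreasing_by
  all_goals
    have h1 := PySem.Int.floordiv_two_mid_bounds (lo := lo) (hi := hi) (le_of_lt h)
    have h2 : PySem.Int.floordiv (lo + hi) 2 < hi :=
      (PySem.Int.floordiv_lt_iff_lt_mul (by omega)).mpr (by omega)
    omega

def mehrPositiveOderNegativeZahlen_alt (liste : List Int) : String :=
  let s := PySem.List.sorted liste (fun x => x) false
  let neg := pvBsearch s 0 (s.length : Int)
  let pos := (s.length : Int) - neg
  if neg > pos then "Die Liste hat mehr negative als positive Zahlen"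
  else if pos > neg then "Die Liste hat mehr positive als negative Zahlen"
  else "Die Liste hat gleich viele positive und negative Zahlen"

-- ===== PRECONDITION & SPEC =====
def Spec_mehrPositiveOderNegativeZahlen (liste : List Int) (out : String) : Prop := out = mehrPositiveOderNegativeZahlen_alt liste
instance (liste : List Int) (out : String) : Decidable (Spec_mehrPositiveOderNegativeZahlen liste out) := by unfold Spec_mehrPositiveOderNegativeZahlen; infer_instance

-- ===== CLAIM (what is proved, stated in full; the proofs are below) =====
def Claim_equal_mehrPositiveOderNegativeZahlen : Prop := ∀ (liste : List Int), Dom_mehrPositiveOderNegativeZahlen liste → Spec_mehrPositiveOderNegativeZahlen liste (mehrPositiveOderNegativeZahlen liste)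

-- ===== LEMMAS AND PROOFS =====

-- A's fold returns the two counts
theorem pv_foldA_counts (liste : List Int) (n p : Int) :
    liste.foldl
      (fun (st : Int × Int) zahl =>
        if zahl < 0 then (st.1 + 1, st.2) else (st.1, st.2 + 1)) (n, p)
      = (n + (liste.countP (fun x => decide (x < 0)) : Int),
         p + (liste.countP (fun x => decide (¬ x < 0)) : Int)) := by
  induction liste generalizing n p with
  | nil => simp
  | cons x xs ih =>
    simp only [List.foldl_cons, List.countP_cons]
    by_cases h : x < 0 <;> simp [h, ih] <;> ring

-- in a sorted list, negatives form a prefix of length countP (· < 0)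
theorem pv_sorted_char (ss : List Int) (hs : ss.Pairwise (· ≤ ·)) :
    ∀ i (hi : i < ss.length),
      (ss[i] < 0 ↔ (i : Int) < (ss.countP (fun x => decide (x < 0)) : Int)) := by
  induction ss with
  | nil => intro i hi; simp at hi
  | cons x xs ih =>
    intro i hi
    rcases List.pairwise_cons.mp hs with ⟨hx, hxs⟩
    by_cases h : x < 0
    · cases i with
      | zero => simp [h]
      | succ j =>
        have hj : j < xs.length := by simpa using hi
        simp only [List.getElem_cons_succ, List.countP_cons, h, decide_true]
        have hiff := ih hxs j hj
        constructor
        · intro hjlt; have := hiff.mp hjlt; push_cast; omega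
        · intro hjlt; exact hiff.mpr (by push_cast at hjlt ⊢; omega)
    · have hall : xs.countP (fun x => decide (x < 0)) = 0 := by
        rw [List.countP_eq_zero]
        intro y hy
        simp only [decide_eq_true_eq]
        have := hx y hy; omega
      cases i with
      | zero => simp [h, hall]
      | succ j =>
        have hj : j < xs.length := by simpa using hi
        have hy : ¬ xs[j] < 0 := by
          have := hx xs[j] (List.getElem_mem hj)
          omega
        simp [h, hall, hy]
        omega

-- binary-search correctness against the prefix characterization
theorem pv_bsearch_eq (s : List Int) (k : Int)
    (hk : ∀ i (hi : i < s.length), (s[i] < 0 ↔ (i : Int) < k)) :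
    ∀ lo hi : Int, 0 ≤ lo → lo ≤ k → k ≤ hi → hi ≤ (s.length : Int) →
      pvBsearch s lo hi = k := by
  intro lo hi
  induction lo, hi using pvBsearch.induct s with
  | case1 lo hi h mid hlt ih =>
    intro h0 hlk hkh hhl
    rw [pvBsearch, dif_pos h]
    have hb := PySem.Int.floordiv_two_mid_bounds (lo := lo) (hi := hi) (le_of_lt h)
    have hmidhi : mid < hi := (PySem.Int.floordiv_lt_iff_lt_mul (by omega)).mpr (by omega)
    have hmrange : mid.toNat < s.length := by omega
    have hget : PySem.List.pyGetD s mid 0 = s[mid.toNat] := by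
      conv_lhs => rw [show mid = ((mid.toNat : Nat) : Int) from by omega]
      rw [PySem.List.pyGetD_natCast]
      simp [List.getD, List.getElem?_eq_getElem hmrange]
    show (if PySem.List.pyGetD s mid 0 < 0 then pvBsearch s (mid + 1) hi
           else pvBsearch s lo mid) = k
    rw [if_pos hlt]
    have hlt' : s[mid.toNat] < 0 := hget ▸ hlt
    have hchar := hk mid.toNat hmrange
    have hmk : mid < k := by
      have heq : ((mid.toNat : Nat) : Int) = mid := by omega
      rw [heq] at hchar
      exact hchar.mp hlt'
    exact ih (by omega) (by omega) hkh hhl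
  | case2 lo hi h mid hge ih =>
    intro h0 hlk hkh hhl
    rw [pvBsearch, dif_pos h]
    have hb := PySem.Int.floordiv_two_mid_bounds (lo := lo) (hi := hi) (le_of_lt h)
    have hmidhi : mid < hi := (PySem.Int.floordiv_lt_iff_lt_mul (by omega)).mpr (by omega)
    have hmrange : mid.toNat < s.length := by omega
    have hget : PySem.List.pyGetD s mid 0 = s[mid.toNat] := by
      conv_lhs => rw [show mid = ((mid.toNat : Nat) : Int) from by omega]
      rw [PySem.List.pyGetD_natCast]
      simp [List.getD, List.getElem?_eq_getElem hmrange]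
    show (if PySem.List.pyGetD s mid 0 < 0 then pvBsearch s (mid + 1) hi
           else pvBsearch s lo mid) = k
    rw [if_neg hge]
    have hge' : ¬ s[mid.toNat] < 0 := hget ▸ hge
    have hchar := hk mid.toNat hmrange
    have hkm : k ≤ mid := by
      have heq : ((mid.toNat : Nat) : Int) = mid := by omega
      rw [heq] at hchar
      by_contra hc
      exact hge' (hchar.mpr (by omega))
    exact ih h0 hlk hkm (by omega)
  | case3 lo hi h =>
    intro h0 hlk hkh hhl
    rw [pvBsearch, dif_neg h]
    omega

-- ===== VERDICT (by name: the statement is the Claim_ definition above) =====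
theorem mehrPositiveOderNegativeZahlen_spec : Claim_equal_mehrPositiveOderNegativeZahlen := by
  intro liste _
  show mehrPositiveOderNegativeZahlen liste = mehrPositiveOderNegativeZahlen_alt liste
  set ss := PySem.List.sorted liste (fun x => x) false with hss
  have hperm : ss.Perm liste := PySem.List.sorted_perm liste (fun x => x) false
  have hlen : ss.length = liste.length := hperm.length_eq
  have hcnt : ss.countP (fun x => decide (x < 0)) = liste.countP (fun x => decide (x < 0)) :=
    hperm.countP_eq _
  have hpair : ss.Pairwise (· ≤ ·) := by
    have := PySem.List.sorted_pairwise liste (fun x => x)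
    simpa using this
  have hk := pv_sorted_char ss hpair
  have hkle : ss.countP (fun x => decide (x < 0)) ≤ ss.length :=
    List.countP_le_length
  have hbs : pvBsearch ss 0 (ss.length : Int) = (ss.countP (fun x => decide (x < 0)) : Int) :=
    pv_bsearch_eq ss _ hk 0 (ss.length : Int) le_rfl (by positivity) (by exact_mod_cast hkle) le_rfl
  have hsplit : liste.countP (fun x => decide (¬ x < 0))
      = liste.length - liste.countP (fun x => decide (x < 0)) := by
    have h1 : liste.length = liste.countP (fun x => decide (x < 0))
        + liste.countP (fun x => decide (0 ≤ x)) := by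
      simpa using List.length_eq_countP_add_countP (l := liste) (p := fun x => decide (x < 0))
    have h2 : liste.countP (fun x => decide (¬ x < 0)) = liste.countP (fun x => decide (0 ≤ x)) :=
      List.countP_congr (fun a _ => by simp [not_lt])
    omega
  have hc : liste.countP (fun x => decide (x < 0)) ≤ liste.length :=
    List.countP_le_length
  have hA : mehrPositiveOderNegativeZahlen liste =
      (if (0 + (liste.countP (fun x => decide (¬ x < 0)) : Int))
            < 0 + (liste.countP (fun x => decide (x < 0)) : Int)
        then "Die Liste hat mehr negative als positive Zahlen"
        else if (0 + (liste.countP (fun x => decide (¬ x < 0)) : Int))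
            > 0 + (liste.countP (fun x => decide (x < 0)) : Int)
        then "Die Liste hat mehr positive als negative Zahlen"
        else "Die Liste hat gleich viele positive und negative Zahlen") := by
    unfold mehrPositiveOderNegativeZahlen
    rw [pv_foldA_counts]
  have hB : mehrPositiveOderNegativeZahlen_alt liste =
      (if pvBsearch ss 0 (ss.length : Int) > (ss.length : Int) - pvBsearch ss 0 (ss.length : Int)
        then "Die Liste hat mehr negative als positive Zahlen"
        else if (ss.length : Int) - pvBsearch ss 0 (ss.length : Int) > pvBsearch ss 0 (ss.length : Int)
        then "Die Liste hat mehr positive als negative Zahlen"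
        else "Die Liste hat gleich viele positive und negative Zahlen") := rfl
  rw [hA, hB, hbs, hcnt, hlen]
  split_ifs <;> first | rfl | (exfalso; omega)
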